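-- pv_equiv track=rewrite | github.com/Supraja90/AI-Rag-System-for-Statesmen-Sample-Data2 | ingest.py | _merge_adjacent_blocks
-- ===== SOURCE A (Python) =====
-- def _merge_adjacent_blocks(blocks, max_gap_px=25):
--     if not blocks:
--         return []
--
--     merged = []
--     cur_x0, cur_y0, cur_x1, cur_y1, cur_txt = list(blocks[0])
--
--     for (x0, y0, x1, y1, txt) in blocks[1:]:
--         gap = y0 - cur_y1
--
--         if gap <= max_gap_px:
--             cur_txt = (cur_txt + " " + txt).strip()
--             cur_y1 = max(cur_y1, y1)
--             cur_x0 = min(cur_x0, x0)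
--             cur_x1 = max(cur_x1, x1)
--         else:
--             merged.append((cur_x0, cur_y0, cur_x1, cur_y1, cur_txt))
--             cur_x0, cur_y0, cur_x1, cur_y1, cur_txt = x0, y0, x1, y1, txt
--
--     merged.append((cur_x0, cur_y0, cur_x1, cur_y1, cur_txt))
--     return merged
-- ===== SOURCE B (Python) =====
-- from functools import reduce
--
--
-- def _merge_adjacent_blocks(blocks, max_gap_px=25):
--     if not blocks:
--         return []
--     # pass 1: split blocks into groups of vertically-adjacent blocks,
--     # tracking the running max y1 within the current group
--     groups = []
--     cur = [blocks[0]]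
--     run_y1 = blocks[0][3]
--     for b in blocks[1:]:
--         if b[1] - run_y1 <= max_gap_px:
--             cur.append(b)
--             run_y1 = max(run_y1, b[3])
--         else:
--             groups.append(cur)
--             cur = [b]
--             run_y1 = b[3]
--     groups.append(cur)
--     # pass 2: aggregate each group into one block
--     out = []
--     for g in groups:
--         x0 = min(b[0] for b in g)
--         y0 = g[0][1]
--         x1 = max(b[2] for b in g)
--         y1 = max(b[3] for b in g)
--         txt = reduce(lambda acc, t: (acc + " " + t).strip(),
--                      (b[4] for b in g[1:]), g[0][4])
--         out.append((x0, y0, x1, y1, txt))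
--     return out
-- ===== Notes on version B (the rewrite author's own statement) =====
-- stated objective: alternative
-- what changed: Single accumulate-in-place loop replaced by a two-pass decomposition: first build the groups of vertically adjacent blocks (tracking only the running max y1), then map each group to its aggregate via min/max/reduce.
import Mathlib
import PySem

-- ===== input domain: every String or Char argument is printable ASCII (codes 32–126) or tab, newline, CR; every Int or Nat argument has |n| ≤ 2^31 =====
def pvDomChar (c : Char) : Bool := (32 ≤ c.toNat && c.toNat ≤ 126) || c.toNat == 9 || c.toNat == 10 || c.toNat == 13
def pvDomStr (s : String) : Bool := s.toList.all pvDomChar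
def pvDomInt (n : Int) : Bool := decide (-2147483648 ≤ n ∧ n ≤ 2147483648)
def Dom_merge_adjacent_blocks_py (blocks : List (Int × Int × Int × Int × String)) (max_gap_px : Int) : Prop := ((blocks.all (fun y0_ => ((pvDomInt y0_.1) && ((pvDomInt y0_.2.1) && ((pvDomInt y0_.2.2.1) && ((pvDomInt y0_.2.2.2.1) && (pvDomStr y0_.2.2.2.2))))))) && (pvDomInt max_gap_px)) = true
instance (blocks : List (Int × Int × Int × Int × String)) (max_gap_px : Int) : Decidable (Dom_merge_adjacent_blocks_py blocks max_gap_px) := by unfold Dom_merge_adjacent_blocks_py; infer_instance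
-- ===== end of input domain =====

-- B replaces A's single accumulate-in-place loop by a two-pass decomposition: build the
-- groups of vertically adjacent blocks, then map each group to its min/max/reduce aggregate.


-- ===== PORT A =====
-- the for-loop of A, carrying (merged, current accumulator block)
def pvLoopA (max_gap_px : Int) :
    List (Int × Int × Int × Int × String) → List (Int × Int × Int × Int × String) →
    (Int × Int × Int × Int × String) → List (Int × Int × Int × Int × String)
  | [], merged, cur => merged ++ [cur]
  | (x0, y0, x1, y1, txt) :: rest, merged, (cx0, cy0, cx1, cy1, ctxt) =>
    if y0 - cy1 ≤ max_gap_px then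
      pvLoopA max_gap_px rest merged
        (min cx0 x0, cy0, max cx1 x1, max cy1 y1, PySem.Str.strip (ctxt ++ " " ++ txt))
    else
      pvLoopA max_gap_px rest (merged ++ [(cx0, cy0, cx1, cy1, ctxt)]) (x0, y0, x1, y1, txt)

def merge_adjacent_blocks_py (blocks : List (Int × Int × Int × Int × String)) (max_gap_px : Int) : List (Int × Int × Int × Int × String) :=
  match blocks with
  | [] => []
  | b0 :: rest => pvLoopA max_gap_px rest [] b0

-- ===== PORT B =====
-- pass 1: group vertically adjacent blocks, tracking the running max y1 of the current group
def pvGroups (max_gap_px : Int) :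
    List (Int × Int × Int × Int × String) → List (Int × Int × Int × Int × String) → Int →
    List (List (Int × Int × Int × Int × String))
  | [], cur, _ => [cur]
  | b :: rest, cur, run_y1 =>
    if b.2.1 - run_y1 ≤ max_gap_px then
      pvGroups max_gap_px rest (cur ++ [b]) (max run_y1 b.2.2.2.1)
    else
      cur :: pvGroups max_gap_px rest [b] b.2.2.2.1

-- pass 2: aggregate one (nonempty) group into a single block
def pvAgg (g : List (Int × Int × Int × Int × String)) : Int × Int × Int × Int × String :=
  match g with
  | [] => (0, 0, 0, 0, "")   -- never reached: groups are nonempty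
  | b0 :: rest =>
    ( (rest.map (·.1)).foldl min b0.1
    , b0.2.1
    , (rest.map (·.2.2.1)).foldl max b0.2.2.1
    , (rest.map (·.2.2.2.1)).foldl max b0.2.2.2.1
    , (rest.map (·.2.2.2.2)).foldl (fun acc t => PySem.Str.strip (acc ++ " " ++ t)) b0.2.2.2.2 )

def merge_adjacent_blocks_py_alt (blocks : List (Int × Int × Int × Int × String)) (max_gap_px : Int) : List (Int × Int × Int × Int × String) :=
  match blocks with
  | [] => []
  | b0 :: rest => (pvGroups max_gap_px rest [b0] b0.2.2.2.1).map pvAgg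

-- ===== PRECONDITION & SPEC =====
def Spec_merge_adjacent_blocks_py (blocks : List (Int × Int × Int × Int × String)) (max_gap_px : Int) (out : List (Int × Int × Int × Int × String)) : Prop := out = merge_adjacent_blocks_py_alt blocks max_gap_px
instance (blocks : List (Int × Int × Int × Int × String)) (max_gap_px : Int) (out : List (Int × Int × Int × Int × String)) : Decidable (Spec_merge_adjacent_blocks_py blocks max_gap_px out) := by unfold Spec_merge_adjacent_blocks_py; infer_instance

-- ===== CLAIM (what is proved, stated in full; the proofs are below) =====
def Claim_equal_merge_adjacent_blocks_py : Prop := ∀ (blocks : List (Int × Int × Int × Int × String)) (max_gap_px : Int), Dom_merge_adjacent_blocks_py blocks max_gap_px → Spec_merge_adjacent_blocks_py blocks max_gap_px (merge_adjacent_blocks_py blocks max_gap_px)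

-- ===== LEMMAS AND PROOFS =====

-- appending a block to a group updates its aggregate exactly as A's merge step does
lemma pvAgg_append (b0 b : Int × Int × Int × Int × String)
    (gs : List (Int × Int × Int × Int × String)) :
    pvAgg (b0 :: (gs ++ [b])) =
      (min (pvAgg (b0 :: gs)).1 b.1, (pvAgg (b0 :: gs)).2.1,
       max (pvAgg (b0 :: gs)).2.2.1 b.2.2.1,
       max (pvAgg (b0 :: gs)).2.2.2.1 b.2.2.2.1,
       PySem.Str.strip ((pvAgg (b0 :: gs)).2.2.2.2 ++ " " ++ b.2.2.2.2)) := by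
  simp [pvAgg]

-- the loop invariant: A's loop from state (merged, aggregate of the current group)
-- produces merged ++ the aggregated groups of B
lemma pvLoopA_eq (max_gap_px : Int) :
    ∀ (rest merged : List (Int × Int × Int × Int × String))
      (b0 : Int × Int × Int × Int × String) (gs : List (Int × Int × Int × Int × String)),
      pvLoopA max_gap_px rest merged (pvAgg (b0 :: gs)) =
        merged ++ (pvGroups max_gap_px rest (b0 :: gs) (pvAgg (b0 :: gs)).2.2.2.1).map pvAgg := by
  intro rest
  induction rest with
  | nil =>
      intro merged b0 gs
      simp [pvLoopA, pvGroups]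
  | cons b rs ih =>
      intro merged b0 gs
      obtain ⟨x0, y0, x1, y1, txt⟩ := b
      by_cases h : y0 - (pvAgg (b0 :: gs)).2.2.2.1 ≤ max_gap_px
      · have hthis := ih merged b0 (gs ++ [(x0, y0, x1, y1, txt)])
        rw [pvAgg_append] at hthis
        simp only [pvLoopA, pvGroups, h, if_pos]
        exact hthis
      · have hthis := ih (merged ++ [pvAgg (b0 :: gs)]) (x0, y0, x1, y1, txt) []
        simp only [pvLoopA, pvGroups, h, if_neg, not_false_iff]
        simp only [pvAgg] at hthis ⊢
        simp only [List.map_nil, List.foldl_nil] at hthis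
        rw [hthis]
        simp [pvAgg]

-- ===== VERDICT (by name: the statement is the Claim_ definition above) =====
theorem merge_adjacent_blocks_py_spec : Claim_equal_merge_adjacent_blocks_py := by
  intro blocks max_gap_px _
  unfold Spec_merge_adjacent_blocks_py
  match blocks with
  | [] => rfl
  | b0 :: rest =>
      have := pvLoopA_eq max_gap_px rest [] b0 []
      simp only [pvAgg, List.map_nil, List.foldl_nil] at this
      simpa [merge_adjacent_blocks_py, merge_adjacent_blocks_py_alt] using this
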